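-- pv_equiv track=rewrite | github.com/gxw1234/USB_dLL_app | spi_test.py | Process_99_frames
-- ===== SOURCE A (Python) =====
-- def Process_99_frames(images_data_list=list):
--     temp = []
--     temp1 = []
--     temp2 = []
--     for k, i in enumerate(images_data_list):
--         if k < 80:
--             temp += list(i)
--         elif k < 160:
--             temp1 += list(i)
--         else:
--             temp2 += list(i)
--
--     return temp, temp1, temp2
-- ===== SOURCE B (Python) =====
-- def Process_99_frames(images_data_list=list):
--     # Flatten everything into one buffer, then cut it at the element-count
--     # offsets of frame 80 and frame 160.
--     frames = [list(i) for i in images_data_list]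
--     flat = [x for f in frames for x in f]
--     n1 = sum(len(f) for f in frames[:80])
--     n2 = sum(len(f) for f in frames[80:160])
--     return flat[:n1], flat[n1:n1 + n2], flat[n1 + n2:]
-- ===== Notes on version B (the rewrite author's own statement) =====
-- stated objective: alternative
-- what changed: Instead of routing each frame into one of three buckets during a pass, B flattens the entire input into a single flat buffer once, computes the element-count offsets of the first 80 and next 80 frames, and slices the flat buffer at those offsets.
import Mathlib
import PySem

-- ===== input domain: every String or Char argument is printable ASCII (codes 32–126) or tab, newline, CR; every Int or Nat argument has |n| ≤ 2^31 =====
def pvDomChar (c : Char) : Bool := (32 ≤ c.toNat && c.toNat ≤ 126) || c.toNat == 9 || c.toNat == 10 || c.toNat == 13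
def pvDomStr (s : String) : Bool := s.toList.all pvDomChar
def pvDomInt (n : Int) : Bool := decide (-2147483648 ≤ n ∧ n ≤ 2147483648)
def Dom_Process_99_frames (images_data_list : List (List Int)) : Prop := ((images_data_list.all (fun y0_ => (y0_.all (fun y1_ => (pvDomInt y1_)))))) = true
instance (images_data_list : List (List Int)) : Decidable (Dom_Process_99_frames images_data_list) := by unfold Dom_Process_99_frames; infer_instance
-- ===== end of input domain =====

-- B flattens the whole input once and cuts that single flat buffer at the element-count
-- offsets of frames 80 and 160, instead of routing frames into three buckets per index (objective: alternative).

-- ===== PORT A =====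
-- for-loop over enumerate with three accumulators, branching on the index
def Process_99_frames (images_data_list : List (List Int)) : List Int × List Int × List Int :=
  (PySem.List.enumerate images_data_list 0).foldl
    (fun acc p =>
      if p.1 < 80 then (acc.1 ++ p.2, acc.2.1, acc.2.2)
      else if p.1 < 160 then (acc.1, acc.2.1 ++ p.2, acc.2.2)
      else (acc.1, acc.2.1, acc.2.2 ++ p.2))
    ([], [], [])

-- ===== PORT B =====
-- sum(len(f) for f in segment)
def pvLenSum (segment : List (List Int)) : Nat := (segment.map List.length).sum

-- flat = [x for f in frames for x in f]; slices with nonnegative bounds = take/drop (exact on lists)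
def Process_99_frames_alt (images_data_list : List (List Int)) : List Int × List Int × List Int :=
  let flat := images_data_list.flatMap (fun f => f)
  let n1 := pvLenSum (images_data_list.take 80)
  let n2 := pvLenSum ((images_data_list.take 160).drop 80)
  (flat.take n1, (flat.drop n1).take n2, flat.drop (n1 + n2))

-- ===== PRECONDITION & SPEC =====
def Spec_Process_99_frames (images_data_list : List (List Int)) (out : List Int × List Int × List Int) : Prop := out = Process_99_frames_alt images_data_list
instance (images_data_list : List (List Int)) (out : List Int × List Int × List Int) : Decidable (Spec_Process_99_frames images_data_list out) := by unfold Spec_Process_99_frames; infer_instance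

-- ===== CLAIM (what is proved, stated in full; the proofs are below) =====
def Claim_equal_Process_99_frames : Prop := ∀ (images_data_list : List (List Int)), Dom_Process_99_frames images_data_list → Spec_Process_99_frames images_data_list (Process_99_frames images_data_list)

-- ===== LEMMAS AND PROOFS =====

-- loop invariant: folding A's body over enumerate xs n appends the three index segments
theorem pvLoop_eq (xs : List (List Int)) : ∀ (n : Nat) (t t1 t2 : List Int),
    (PySem.List.enumerate xs (n : Int)).foldl
      (fun acc p =>
        if p.1 < 80 then (acc.1 ++ p.2, acc.2.1, acc.2.2)
        else if p.1 < 160 then (acc.1, acc.2.1 ++ p.2, acc.2.2)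
        else (acc.1, acc.2.1, acc.2.2 ++ p.2))
      (t, t1, t2)
    = (t ++ (xs.take (80 - n)).flatMap (fun f => f),
       t1 ++ ((xs.take (160 - n)).drop (80 - n)).flatMap (fun f => f),
       t2 ++ (xs.drop (160 - n)).flatMap (fun f => f)) := by
  induction xs with
  | nil => intro n t t1 t2; simp [PySem.List.enumerate_nil]
  | cons x xs ih =>
    intro n t t1 t2
    rw [PySem.List.enumerate_cons]
    by_cases h80 : n < 80
    · have e1 : 80 - n = (80 - (n+1)) + 1 := by omega
      have e2 : 160 - n = (160 - (n+1)) + 1 := by omega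
      simp only [List.foldl_cons, if_pos (show (n : Int) < 80 by exact_mod_cast h80)]
      have : ((n : Int) + 1) = ((n + 1 : Nat) : Int) := by push_cast; ring
      rw [this, ih (n+1), e1, e2]
      simp
    · by_cases h160 : n < 160
      · have e2 : 160 - n = (160 - (n+1)) + 1 := by omega
        have e1 : 80 - n = 0 := by omega
        have e1' : 80 - (n+1) = 0 := by omega
        simp only [List.foldl_cons,
          if_neg (show ¬ (n : Int) < 80 by exact_mod_cast h80),
          if_pos (show (n : Int) < 160 by exact_mod_cast h160)]
        have : ((n : Int) + 1) = ((n + 1 : Nat) : Int) := by push_cast; ring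
        rw [this, ih (n+1), e1, e1', e2]
        simp
      · have e1 : 80 - n = 0 := by omega
        have e1' : 80 - (n+1) = 0 := by omega
        have e2 : 160 - n = 0 := by omega
        have e2' : 160 - (n+1) = 0 := by omega
        simp only [List.foldl_cons,
          if_neg (show ¬ (n : Int) < 80 by exact_mod_cast h80),
          if_neg (show ¬ (n : Int) < 160 by exact_mod_cast h160)]
        have : ((n : Int) + 1) = ((n + 1 : Nat) : Int) := by push_cast; ring
        rw [this, ih (n+1), e1, e1', e2, e2']
        simp

-- taking the first lenSum(xs.take k) elements of the full flatten yields the flatten of the first k frames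
theorem pvFlat_take (xs : List (List Int)) : ∀ (k : Nat),
    (xs.flatMap (fun f => f)).take (pvLenSum (xs.take k)) = (xs.take k).flatMap (fun f => f) := by
  induction xs with
  | nil => intro k; simp [pvLenSum]
  | cons x xs ih =>
    intro k
    cases k with
    | zero => simp [pvLenSum]
    | succ k =>
      have hs : pvLenSum (x :: xs.take k) = x.length + pvLenSum (xs.take k) := by
        simp [pvLenSum]
      simp only [List.take_succ_cons, List.flatMap_cons, hs]
      rw [List.take_length_add_append, ih k]

-- dropping the first lenSum(xs.take k) elements of the full flatten yields the flatten of the rest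
theorem pvFlat_drop (xs : List (List Int)) : ∀ (k : Nat),
    (xs.flatMap (fun f => f)).drop (pvLenSum (xs.take k)) = (xs.drop k).flatMap (fun f => f) := by
  induction xs with
  | nil => intro k; simp [pvLenSum]
  | cons x xs ih =>
    intro k
    cases k with
    | zero => simp [pvLenSum]
    | succ k =>
      have hs : pvLenSum (x :: xs.take k) = x.length + pvLenSum (xs.take k) := by
        simp [pvLenSum]
      simp only [List.drop_succ_cons, List.take_succ_cons, List.flatMap_cons, hs]
      rw [List.drop_length_add_append, ih k]

-- the two offsets add up to the offset of frame 160
theorem pvLenSum_split (xs : List (List Int)) :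
    pvLenSum (xs.take 80) + pvLenSum ((xs.take 160).drop 80) = pvLenSum (xs.take 160) := by
  have h : xs.take 160 = (xs.take 160).take 80 ++ (xs.take 160).drop 80 := (List.take_append_drop _ _).symm
  have h80 : (xs.take 160).take 80 = xs.take 80 := by
    rw [List.take_take]
    norm_num
  calc pvLenSum (xs.take 80) + pvLenSum ((xs.take 160).drop 80)
      = pvLenSum ((xs.take 160).take 80 ++ (xs.take 160).drop 80) := by
        simp [pvLenSum, h80]
    _ = pvLenSum (xs.take 160) := by rw [← h]

-- B's result written without the lets, via the three flatten lemmas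
theorem pvAlt_eq (xs : List (List Int)) :
    Process_99_frames_alt xs
    = ((xs.take 80).flatMap (fun f => f),
       ((xs.take 160).drop 80).flatMap (fun f => f),
       (xs.drop 160).flatMap (fun f => f)) := by
  simp only [Process_99_frames_alt]
  refine Prod.ext ?_ (Prod.ext ?_ ?_)
  · exact pvFlat_take xs 80
  · show ((xs.flatMap (fun f => f)).drop (pvLenSum (xs.take 80))).take (pvLenSum ((xs.take 160).drop 80))
        = ((xs.take 160).drop 80).flatMap (fun f => f)
    rw [pvFlat_drop xs 80,
      show (xs.take 160).drop 80 = (xs.drop 80).take 80 from by rw [List.drop_take]]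
    exact pvFlat_take (xs.drop 80) 80
  · show (xs.flatMap (fun f => f)).drop (pvLenSum (xs.take 80) + pvLenSum ((xs.take 160).drop 80))
        = (xs.drop 160).flatMap (fun f => f)
    rw [pvLenSum_split, pvFlat_drop xs 160]

-- ===== VERDICT (by name: the statement is the Claim_ definition above) =====
theorem Process_99_frames_spec : Claim_equal_Process_99_frames := by
  intro xs _
  unfold Spec_Process_99_frames Process_99_frames
  have hA := pvLoop_eq xs 0 [] [] []
  simp only [Nat.cast_zero, Nat.sub_zero, List.nil_append] at hA
  rw [hA, pvAlt_eq]
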